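-- pv_equiv track=rewrite | github.com/kirill-kondrashov/lean-misc | tools/problem1_odd_profile_search.py | enumerate_antichains
-- ===== SOURCE A (Python) =====
-- from typing import Dict, Iterable, List, Sequence, Set, Tuple
--
-- def subset_cardinality(mask: int) -> int:
--     return mask.bit_count()
--
-- def enumerate_antichains(subsets: Sequence[int]) -> List[Tuple[int, ...]]:
--     order = sorted(subsets, key=lambda mask: (subset_cardinality(mask), mask), reverse=True)
--     comparable: Dict[int, Set[int]] = {mask: set() for mask in subsets}
--     for left in subsets:
--         for right in subsets:
--             if (left & right) == left or (left & right) == right: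
--                 comparable[left].add(right)
--
--     antichains: List[Tuple[int, ...]] = []
--     chosen: List[int] = []
--
--     def go(index: int, forbidden: Set[int]) -> None:
--         if index == len(order):
--             antichains.append(tuple(chosen))
--             return
--         current = order[index]
--         go(index + 1, forbidden)
--         if current not in forbidden:
--             chosen.append(current)
--             go(index + 1, forbidden | comparable[current])
--             chosen.pop()
--
--     go(0, set())
--     return antichains
-- ===== SOURCE B (Python) =====
-- from typing import List, Sequence, Tuple
--
-- def enumerate_antichains(subsets: Sequence[int]) -> List[Tuple[int, ...]]:
--     order = sorted(subsets, key=lambda mask: (mask.bit_count(), mask), reverse=True)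
--     acc: List[Tuple[int, ...]] = [()]
--     for mask in reversed(order):
--         acc = acc + [(mask,) + t for t in acc
--                      if all((mask & x) != mask and (mask & x) != x for x in t)]
--     return acc
-- ===== Notes on version B (the rewrite author's own statement) =====
-- stated objective: simpler
-- what changed: Replaces A's recursive DFS with a mutated chosen-list and forbidden-sets built from a precomputed comparability dict by a short iterative DP: fold over the sorted order back-to-front, extending the accumulated antichain list with direct pairwise incomparability checks (no comparable dict, no recursion).
import Mathlib
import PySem

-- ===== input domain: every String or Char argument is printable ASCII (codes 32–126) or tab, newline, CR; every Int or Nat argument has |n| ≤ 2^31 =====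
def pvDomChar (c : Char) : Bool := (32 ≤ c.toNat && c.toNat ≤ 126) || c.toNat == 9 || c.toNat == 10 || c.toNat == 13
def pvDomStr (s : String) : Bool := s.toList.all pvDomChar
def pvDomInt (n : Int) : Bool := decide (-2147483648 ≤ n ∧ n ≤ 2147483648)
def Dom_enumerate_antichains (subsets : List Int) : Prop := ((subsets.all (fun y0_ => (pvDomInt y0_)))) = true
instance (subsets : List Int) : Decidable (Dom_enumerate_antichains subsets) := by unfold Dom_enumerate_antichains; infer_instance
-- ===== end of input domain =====

-- B replaces A's recursive DFS with forbidden-sets and a comparability dict by a short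
-- iterative fold over the sorted order back-to-front with direct pairwise checks (simpler; not faster).

-- ===== PORT A =====
-- comparable = {mask: set() for mask in subsets}; for left in subsets: for right in subsets: …
def pvBuildComparable (subsets : List Int) : PySem.Dict Int (PySem.Set Int) :=
  subsets.foldl (fun d left =>
    subsets.foldl (fun d right =>
      if (PySem.Int.band left right == left || PySem.Int.band left right == right)
      then d.modify left PySem.Set.empty (fun s => PySem.Set.add s right) else d) d)
    (subsets.foldl (fun d mask => d.insert mask PySem.Set.empty) PySem.Dict.empty)

-- def go(index, forbidden): …  (index ported as the remaining suffix of order; the shared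
-- antichains/chosen lists ported as return value / accumulator parameter)
def pvGo (comp : PySem.Dict Int (PySem.Set Int)) (suffix : List Int)
    (chosen : List Int) (forbidden : PySem.Set Int) : List (List Int) :=
  match suffix with
  | [] => [chosen]
  | current :: rest =>
      pvGo comp rest chosen forbidden ++
      (if !(PySem.Set.contains forbidden current) then
        pvGo comp rest (chosen ++ [current]) (PySem.Set.union forbidden (comp.getD current PySem.Set.empty))
      else [])

def enumerate_antichains (subsets : List Int) : List (List Int) :=
  pvGo (pvBuildComparable subsets)
    (PySem.List.sorted2 subsets (fun mask => PySem.Int.bitCount mask) (fun mask => mask) true)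
    [] PySem.Set.empty

-- ===== PORT B =====
def enumerate_antichains_alt (subsets : List Int) : List (List Int) :=
  (PySem.List.sorted2 subsets (fun mask => PySem.Int.bitCount mask) (fun mask => mask) true).reverse.foldl
    (fun acc mask =>
      acc ++ (acc.filter (fun t =>
        t.all (fun x => !(PySem.Int.band mask x == mask) && !(PySem.Int.band mask x == x)))).map
        (fun t => mask :: t))
    [[]]

-- ===== PRECONDITION & SPEC =====
def Spec_enumerate_antichains (subsets : List Int) (out : List (List Int)) : Prop := out = enumerate_antichains_alt subsets
instance (subsets : List Int) (out : List (List Int)) : Decidable (Spec_enumerate_antichains subsets out) := by unfold Spec_enumerate_antichains; infer_instance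

-- ===== CLAIM (what is proved, stated in full; the proofs are below) =====
def Claim_equal_enumerate_antichains : Prop := ∀ (subsets : List Int), Dom_enumerate_antichains subsets → Spec_enumerate_antichains subsets (enumerate_antichains subsets)

-- ===== LEMMAS AND PROOFS =====

-- B's pairwise incomparability test
def pvCompat (m x : Int) : Bool :=
  !(PySem.Int.band m x == m) && !(PySem.Int.band m x == x)

lemma pvCompat_eq (m x : Int) :
    pvCompat m x = !(PySem.Int.band m x == m || PySem.Int.band m x == x) := by
  simp [pvCompat]

lemma pvAll_and (l : List Int) (p q : Int → Bool) :
    l.all (fun x => p x && q x) = (l.all p && l.all q) := by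
  induction l with
  | nil => rfl
  | cons a l ih => cases hp : p a <;> cases hq : q a <;> simp [List.all_cons, hp, hq, ih]

lemma pvAll_congr (l : List Int) (p q : Int → Bool) (h : ∀ x ∈ l, p x = q x) :
    l.all p = l.all q := by
  induction l with
  | nil => rfl
  | cons a l ih =>
      simp only [List.all_cons, h a List.mem_cons_self,
        ih (fun x hx => h x (List.mem_cons_of_mem _ hx))]

-- the list of antichains of l (in A's emission order = B's construction order)
def pvAnt (l : List Int) : List (List Int) :=
  match l with
  | [] => [[]]
  | m :: rest =>
      pvAnt rest ++ ((pvAnt rest).filter (fun t => t.all (fun x => pvCompat m x))).map (fun t => m :: t)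

lemma pvAnt_mem {l : List Int} {t : List Int} (ht : t ∈ pvAnt l) : ∀ x ∈ t, x ∈ l := by
  induction l generalizing t with
  | nil => simp [pvAnt] at ht; simp [ht]
  | cons m rest ih =>
      simp only [pvAnt, List.mem_append, List.mem_map, List.mem_filter] at ht
      rcases ht with ht | ⟨s, ⟨hs, _⟩, rfl⟩
      · intro x hx; exact List.mem_cons_of_mem _ (ih ht x hx)
      · intro x hx
        rcases List.mem_cons.mp hx with rfl | hx
        · exact List.mem_cons_self
        · exact List.mem_cons_of_mem _ (ih hs x hx)

-- B's fold equals pvAnt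
lemma pvAlt_fold_eq (l : List Int) :
    l.reverse.foldl
      (fun acc mask =>
        acc ++ (acc.filter (fun t =>
          t.all (fun x => !(PySem.Int.band mask x == mask) && !(PySem.Int.band mask x == x)))).map
          (fun t => mask :: t))
      [[]] = pvAnt l := by
  induction l with
  | nil => rfl
  | cons m rest ih =>
      simp only [List.reverse_cons, List.foldl_append, List.foldl_cons, List.foldl_nil, ih]
      rfl

-- characterization of the comparable dict: inner loop over `right`
lemma pvInner_getD (rs : List Int) (l : Int) (d : PySem.Dict Int (PySem.Set Int)) (x : Int) :
    x ∈ (rs.foldl (fun d r =>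
          if (PySem.Int.band l r == l || PySem.Int.band l r == r)
          then d.modify l PySem.Set.empty (fun s => PySem.Set.add s r) else d) d).getD l PySem.Set.empty
      ↔ x ∈ d.getD l PySem.Set.empty
        ∨ (x ∈ rs ∧ (PySem.Int.band l x == l || PySem.Int.band l x == x) = true) := by
  induction rs generalizing d with
  | nil => simp
  | cons r rs ih =>
      simp only [List.foldl_cons]
      by_cases h : (PySem.Int.band l r == l || PySem.Int.band l r == r) = true
      · rw [if_pos h, ih, PySem.Dict.getD_modify_self, PySem.Set.mem_add]
        constructor
        · rintro ((hx | rfl) | ⟨hm, hc⟩)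
          · exact Or.inl hx
          · exact Or.inr ⟨List.mem_cons_self, h⟩
          · exact Or.inr ⟨List.mem_cons_of_mem _ hm, hc⟩
        · rintro (hx | ⟨hm, hc⟩)
          · exact Or.inl (Or.inl hx)
          · rcases List.mem_cons.mp hm with rfl | hm
            · exact Or.inl (Or.inr rfl)
            · exact Or.inr ⟨hm, hc⟩
      · rw [if_neg h, ih]
        constructor
        · rintro (hx | ⟨hm, hc⟩)
          · exact Or.inl hx
          · exact Or.inr ⟨List.mem_cons_of_mem _ hm, hc⟩
        · rintro (hx | ⟨hm, hc⟩)
          · exact Or.inl hx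
          · rcases List.mem_cons.mp hm with rfl | hm
            · exact absurd hc h
            · exact Or.inr ⟨hm, hc⟩

lemma pvInner_getD_ne (rs : List Int) (l k : Int) (hk : k ≠ l) (d : PySem.Dict Int (PySem.Set Int)) :
    (rs.foldl (fun d r =>
        if (PySem.Int.band l r == l || PySem.Int.band l r == r)
        then d.modify l PySem.Set.empty (fun s => PySem.Set.add s r) else d) d).getD k PySem.Set.empty
      = d.getD k PySem.Set.empty := by
  induction rs generalizing d with
  | nil => rfl
  | cons r rs ih =>
      simp only [List.foldl_cons]
      by_cases h : (PySem.Int.band l r == l || PySem.Int.band l r == r) = true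
      · rw [if_pos h, ih, PySem.Dict.getD_modify, if_neg hk]
      · rw [if_neg h, ih]

lemma pvOuter_getD (subsets ls : List Int) (d : PySem.Dict Int (PySem.Set Int)) (m x : Int) :
    x ∈ (ls.foldl (fun d left =>
          subsets.foldl (fun d right =>
            if (PySem.Int.band left right == left || PySem.Int.band left right == right)
            then d.modify left PySem.Set.empty (fun s => PySem.Set.add s right) else d) d) d).getD m PySem.Set.empty
      ↔ x ∈ d.getD m PySem.Set.empty
        ∨ (m ∈ ls ∧ x ∈ subsets ∧ (PySem.Int.band m x == m || PySem.Int.band m x == x) = true) := by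
  induction ls generalizing d with
  | nil => simp
  | cons left ls ih =>
      simp only [List.foldl_cons]
      rw [ih]
      by_cases h : m = left
      · subst h
        rw [pvInner_getD]
        constructor
        · rintro ((hx | ⟨hs, hc⟩) | ⟨hm, hs, hc⟩)
          · exact Or.inl hx
          · exact Or.inr ⟨List.mem_cons_self, hs, hc⟩
          · exact Or.inr ⟨List.mem_cons_of_mem _ hm, hs, hc⟩
        · rintro (hx | ⟨_, hs, hc⟩)
          · exact Or.inl (Or.inl hx)
          · exact Or.inl (Or.inr ⟨hs, hc⟩)
      · rw [pvInner_getD_ne _ _ _ h]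
        constructor
        · rintro (hx | ⟨hm, hs, hc⟩)
          · exact Or.inl hx
          · exact Or.inr ⟨List.mem_cons_of_mem _ hm, hs, hc⟩
        · rintro (hx | ⟨hm, hs, hc⟩)
          · exact Or.inl hx
          · rcases List.mem_cons.mp hm with rfl | hm
            · exact absurd rfl h
            · exact Or.inr ⟨hm, hs, hc⟩

lemma pvInit_getD (ls : List Int) (d : PySem.Dict Int (PySem.Set Int)) (m : Int)
    (hd : d.getD m PySem.Set.empty = PySem.Set.empty) :
    (ls.foldl (fun d mask => d.insert mask PySem.Set.empty) d).getD m PySem.Set.empty = PySem.Set.empty := by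
  induction ls generalizing d with
  | nil => exact hd
  | cons mask ls ih =>
      simp only [List.foldl_cons]
      apply ih
      by_cases h : m = mask
      · subst h; rw [PySem.Dict.getD_insert_self]
      · rw [PySem.Dict.getD_insert_of_ne _ _ _ h]; exact hd

lemma pvComparable_mem (subsets : List Int) (m x : Int) :
    x ∈ (pvBuildComparable subsets).getD m PySem.Set.empty
      ↔ m ∈ subsets ∧ x ∈ subsets ∧ (PySem.Int.band m x == m || PySem.Int.band m x == x) = true := by
  unfold pvBuildComparable
  rw [pvOuter_getD, pvInit_getD subsets PySem.Dict.empty m (by rfl)]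
  simp [PySem.Set.empty]

-- main loop invariant for A's DFS
lemma pvGo_eq (subsets : List Int) (suffix : List Int) (hsub : ∀ y ∈ suffix, y ∈ subsets)
    (chosen : List Int) (F : PySem.Set Int) :
    pvGo (pvBuildComparable subsets) suffix chosen F
      = ((pvAnt suffix).filter (fun t => t.all (fun x => !(PySem.Set.contains F x)))).map
          (fun t => chosen ++ t) := by
  induction suffix generalizing chosen F with
  | nil => simp [pvGo, pvAnt]
  | cons m rest ih =>
      have hm : m ∈ subsets := hsub m List.mem_cons_self
      have hrest : ∀ y ∈ rest, y ∈ subsets := fun y hy => hsub y (List.mem_cons_of_mem _ hy)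
      simp only [pvGo, pvAnt, List.filter_append, List.map_append]
      congr 1
      · exact ih hrest chosen F
      · rw [List.filter_map, List.filter_filter, List.map_map]
        by_cases hF : PySem.Set.contains F m = true
        · rw [if_neg (by rw [hF]; simp)]
          rw [List.filter_eq_nil_iff.mpr (fun t _ => by
            simp only [Function.comp_apply, List.all_cons, hF, Bool.not_true, Bool.false_and]
            exact Bool.false_ne_true)]
          rfl
        · have hF' : PySem.Set.contains F m = false := by
            cases h : PySem.Set.contains F m
            · rfl
            · exact absurd h hF
          rw [if_pos (by rw [hF']; rfl), ih hrest]
          have hfun : ((fun t => chosen ++ t) ∘ (fun t => m :: t))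
              = fun t : List Int => (chosen ++ [m]) ++ t := by
            funext t; simp
          rw [hfun]
          refine congrArg _ (List.filter_congr ?_)
          intro t ht
          have htx := pvAnt_mem ht
          simp only [Function.comp_apply, List.all_cons, hF', Bool.not_false, Bool.true_and]
          rw [← pvAll_and]
          refine pvAll_congr _ _ _ ?_
          intro x hx
          have hxs : x ∈ subsets := hrest x (htx x hx)
          have hmem : (PySem.Set.contains (PySem.Set.union F ((pvBuildComparable subsets).getD m PySem.Set.empty)) x = true)
              ↔ (PySem.Set.contains F x = true
                  ∨ (PySem.Int.band m x == m || PySem.Int.band m x == x) = true) := by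
            rw [PySem.Set.contains_iff, PySem.Set.mem_union, PySem.Set.contains_iff,
              pvComparable_mem]
            simp [hm, hxs]
          rw [pvCompat_eq]
          cases h1 : PySem.Set.contains F x <;>
            cases h2 : (PySem.Int.band m x == m || PySem.Int.band m x == x)
          · have h3 : PySem.Set.contains (PySem.Set.union F ((pvBuildComparable subsets).getD m PySem.Set.empty)) x = false := by
              cases h : PySem.Set.contains (PySem.Set.union F ((pvBuildComparable subsets).getD m PySem.Set.empty)) x
              · rfl
              · rcases hmem.mp h with h4 | h4
                · rw [h1] at h4; exact Bool.noConfusion h4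
                · rw [h2] at h4; exact Bool.noConfusion h4
            rw [h3]; rfl
          · rw [hmem.mpr (Or.inr h2)]; rfl
          · rw [hmem.mpr (Or.inl h1)]; rfl
          · rw [hmem.mpr (Or.inl h1)]; rfl

-- ===== VERDICT (by name: the statement is the Claim_ definition above) =====
theorem enumerate_antichains_spec : Claim_equal_enumerate_antichains := by
  intro subsets _
  unfold Spec_enumerate_antichains enumerate_antichains enumerate_antichains_alt
  rw [pvAlt_fold_eq]
  rw [pvGo_eq subsets _
    (fun y hy => (PySem.List.sorted2_perm subsets _ _ true).mem_iff.mp hy) [] PySem.Set.empty]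
  simp [PySem.Set.empty, PySem.Set.contains]
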